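-- pv_equiv track=rewrite | github.com/pptam/pptam-tool | design/hotelreservation/parse_import_dependencies.py | find_shared_fields
-- ===== SOURCE A (Python) =====
-- def find_shared_fields(service_fields):
--     shared = []
--     services = list(service_fields.keys())
--     for i in range(len(services)):
--         for j in range(i + 1, len(services)):
--             s1, s2 = sorted((services[i], services[j]))  # sort to avoid reverse duplicates
--             common = service_fields[s1] & service_fields[s2]
--             if common:
--                 shared.append((s1, s2, sorted(common)))
--     return shared
-- ===== SOURCE B (Python) =====
-- def _pairs(lst):
--     out = []
--     rest = list(lst)
--     while rest:
--         h = rest.pop(0)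
--         for v in rest:
--             out.append((h, v))
--     return out
--
--
-- def find_shared_fields(service_fields):
--     # inverted index: field -> list of services containing it (in key order)
--     index = {}
--     for svc, fields in service_fields.items():
--         for f in fields:
--             index.setdefault(f, []).append(svc)
--     # accumulate shared fields per unordered service pair
--     pair_fields = {}
--     for f, svcs in index.items():
--         for u, v in _pairs(svcs):
--             key = (u, v) if u < v else (v, u)
--             pair_fields.setdefault(key, []).append(f)
--     # restore the original pair enumeration order via key positions
--     pos = {s: i for i, s in enumerate(service_fields)}
--     n = len(service_fields)
--     out = [(a, b, sorted(fs)) for (a, b), fs in pair_fields.items()]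
--     out.sort(key=lambda t: min(pos[t[0]], pos[t[1]]) * n + max(pos[t[0]], pos[t[1]]))
--     return out
-- ===== Notes on version B (the rewrite author's own statement) =====
-- stated objective: alternative
-- what changed: Replaces the all-pairs set-intersection scan with an inverted index field->services plus a pair->shared-fields accumulator, restoring A's pair order by a final sort on key positions.
import Mathlib
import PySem

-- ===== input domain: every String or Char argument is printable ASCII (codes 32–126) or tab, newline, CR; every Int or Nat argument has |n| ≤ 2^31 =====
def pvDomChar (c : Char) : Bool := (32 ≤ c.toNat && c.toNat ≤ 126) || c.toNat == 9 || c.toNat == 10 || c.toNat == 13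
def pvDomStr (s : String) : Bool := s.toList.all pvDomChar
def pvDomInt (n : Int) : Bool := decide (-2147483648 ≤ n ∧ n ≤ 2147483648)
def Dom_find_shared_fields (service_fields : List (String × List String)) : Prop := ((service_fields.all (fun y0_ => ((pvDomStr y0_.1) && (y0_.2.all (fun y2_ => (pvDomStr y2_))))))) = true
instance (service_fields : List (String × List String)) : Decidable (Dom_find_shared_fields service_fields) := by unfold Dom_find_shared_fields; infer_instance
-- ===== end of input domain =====

-- B replaces A's all-pairs set-intersection scan by an inverted index (field -> services) and a
-- pair -> shared-fields accumulator, restoring A's pair order by a final sort on key positions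
-- (objective: alternative algorithm, same exact output).
-- ===== PORT A =====
-- literal port of A: services = keys; double index loop; sorted pair; set intersection
def find_shared_fields (service_fields : List (String × List String)) : List (String × String × List String) :=
  let d := PySem.Dict.ofList service_fields
  let services := d.keys
  (PySem.List.pyRange 0 (PySem.List.len services) 1).foldl (fun shared i =>
    (PySem.List.pyRange (i + 1) (PySem.List.len services) 1).foldl (fun shared j =>
      let st := PySem.List.sorted [PySem.List.pyGetD services i "", PySem.List.pyGetD services j ""] (fun x => x) false
      let s1 := PySem.List.pyGetD st 0 ""
      let s2 := PySem.List.pyGetD st 1 ""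
      let common := PySem.Set.inter (PySem.Set.ofList (d.getD s1 [])) (PySem.Set.ofList (d.getD s2 []))
      if common ≠ [] then shared ++ [(s1, s2, PySem.List.sorted common (fun x => x) false)]
      else shared) shared) []

-- ===== PORT B =====
-- helper: port of Source B's _pairs (all ordered pairs (earlier, later))
def pairsOf {α : Type} : List α → List (α × α)
  | [] => []
  | h :: t => t.map (fun v => (h, v)) ++ pairsOf t

-- port of B: inverted index field→services, pair→fields accumulator, final sort by positions
-- (Source B's 'for f in fields' iterates a Python set whose order cannot affect the result; ported via Set.ofList)
def find_shared_fields_alt (service_fields : List (String × List String)) : List (String × String × List String) :=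
  let d := PySem.Dict.ofList service_fields
  let index := d.items.foldl (fun idx p =>
      (PySem.Set.ofList p.2).foldl (fun idx f => idx.modify f [] (· ++ [p.1])) idx)
    (PySem.Dict.empty : PySem.Dict String (List String))
  let pf := index.items.foldl (fun pf q =>
      (pairsOf q.2).foldl (fun pf uv =>
        pf.modify (if uv.1 < uv.2 then (uv.1, uv.2) else (uv.2, uv.1)) [] (· ++ [q.1])) pf)
    (PySem.Dict.empty : PySem.Dict (String × String) (List String))
  let pos := (PySem.List.enumerate d.keys 0).foldl (fun m is => m.insert is.2 is.1)
    (PySem.Dict.empty : PySem.Dict String Int)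
  let n := PySem.Dict.size d
  let out := pf.items.map (fun e => (e.1.1, e.1.2, PySem.List.sorted e.2 (fun x => x) false))
  PySem.List.sorted out
    (fun t => min (pos.getD t.1 0) (pos.getD t.2.1 0) * n + max (pos.getD t.1 0) (pos.getD t.2.1 0)) false

-- ===== PRECONDITION & SPEC =====
def Spec_find_shared_fields (service_fields : List (String × List String)) (out : List (String × String × List String)) : Prop := out = find_shared_fields_alt service_fields
instance (service_fields : List (String × List String)) (out : List (String × String × List String)) : Decidable (Spec_find_shared_fields service_fields out) := by unfold Spec_find_shared_fields; infer_instance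

-- ===== CLAIM (what is proved, stated in full; the proofs are below) =====
def Claim_equal_find_shared_fields : Prop := ∀ (service_fields : List (String × List String)), Dom_find_shared_fields service_fields → Spec_find_shared_fields service_fields (find_shared_fields service_fields)

-- ===== LEMMAS AND PROOFS =====
-- proof-side abbreviations for the values the two ports compute
def ordp (q : String × String) : String × String := if q.1 < q.2 then (q.1, q.2) else (q.2, q.1)

def pvD (sf : List (String × List String)) : PySem.Dict String (List String) := PySem.Dict.ofList sf

def pvKs (sf : List (String × List String)) : List String := (pvD sf).keys

def pvS (sf : List (String × List String)) (s : String) : List String :=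
  PySem.Set.ofList ((pvD sf).getD s [])

def pvInter (sf : List (String × List String)) (P : String × String) : List String :=
  PySem.Set.inter (pvS sf P.1) (pvS sf P.2)

def pvG (sf : List (String × List String)) (P : String × String) : String × String × List String :=
  (P.1, P.2, PySem.List.sorted (pvInter sf P) (fun x => x) false)

def pvP (sf : List (String × List String)) (P : String × String) : Bool :=
  decide (pvInter sf P ≠ [])

def pvIdx (sf : List (String × List String)) : PySem.Dict String (List String) :=
  (pvD sf).items.foldl (fun idx p =>
      (PySem.Set.ofList p.2).foldl (fun idx f => idx.modify f [] (· ++ [p.1])) idx)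
    (PySem.Dict.empty : PySem.Dict String (List String))

def pvFK (sf : List (String × List String)) : List String := (pvIdx sf).keys

def pvPf (sf : List (String × List String)) : PySem.Dict (String × String) (List String) :=
  (pvIdx sf).items.foldl (fun pf q =>
      (pairsOf q.2).foldl (fun pf uv =>
        pf.modify (if uv.1 < uv.2 then (uv.1, uv.2) else (uv.2, uv.1)) [] (· ++ [q.1])) pf)
    (PySem.Dict.empty : PySem.Dict (String × String) (List String))

def pvPos (sf : List (String × List String)) : PySem.Dict String Int :=
  (PySem.List.enumerate (pvD sf).keys 0).foldl (fun m is => m.insert is.2 is.1)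
    (PySem.Dict.empty : PySem.Dict String Int)

def pvKey (sf : List (String × List String)) (t : String × String × List String) : Int :=
  min ((pvPos sf).getD t.1 0) ((pvPos sf).getD t.2.1 0) * (PySem.Dict.size (pvD sf)) +
  max ((pvPos sf).getD t.1 0) ((pvPos sf).getD t.2.1 0)

-- generic small lemmas -------------------------------------------------------
theorem filter_map_pair {β γ : Type} [BEq β] [LawfulBEq β] (l : List β) (hl : l.Nodup) (c : γ) (x : β) :
    ((l.map (fun y => (y, c))).filter (fun e => e.1 == x)) = if x ∈ l then [(x, c)] else [] := by
  induction l with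
  | nil => simp
  | cons hd t ih =>
    rcases List.nodup_cons.mp hl with ⟨hht, hnd⟩
    by_cases hx : hd = x
    · subst hx
      simp only [List.map_cons, List.filter_cons]
      rw [ih hnd]
      simp [hht]
    · have hbeq : (hd == x) = false := by simp [hx]
      simp only [List.map_cons, List.filter_cons, hbeq]
      rw [ih hnd]
      by_cases hm : x ∈ t <;> simp [hm, Ne.symm hx]

theorem mem_pairsOf {α : Type} {l : List α} {q : α × α} (h : q ∈ pairsOf l) :
    q.1 ∈ l ∧ q.2 ∈ l := by
  induction l with
  | nil => simp [pairsOf] at h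
  | cons x t ih =>
    simp only [pairsOf, List.mem_append, List.mem_map] at h
    rcases h with ⟨v, hv, rfl⟩ | h
    · exact ⟨List.mem_cons_self, List.mem_cons_of_mem _ hv⟩
    · rcases ih h with ⟨h1, h2⟩; exact ⟨List.mem_cons_of_mem _ h1, List.mem_cons_of_mem _ h2⟩

theorem pairsOf_ne {α : Type} {l : List α} (hl : l.Nodup) {q : α × α} (h : q ∈ pairsOf l) :
    q.1 ≠ q.2 := by
  induction l with
  | nil => simp [pairsOf] at h
  | cons x t ih =>
    rcases List.nodup_cons.mp hl with ⟨hxt, hnd⟩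
    simp only [pairsOf, List.mem_append, List.mem_map] at h
    rcases h with ⟨v, hv, rfl⟩ | h
    · intro he; simp only at he; exact hxt (by rw [he]; exact hv)
    · exact ih hnd h

theorem pairsOf_total {α : Type} {l : List α} {a b : α}
    (ha : a ∈ l) (hb : b ∈ l) (hne : a ≠ b) : (a, b) ∈ pairsOf l ∨ (b, a) ∈ pairsOf l := by
  induction l with
  | nil => simp at ha
  | cons x t ih =>
    simp only [pairsOf, List.mem_append, List.mem_map]
    rcases List.mem_cons.mp ha with rfl | ha'
    · left; left; exact ⟨b, by rcases List.mem_cons.mp hb with rfl | h; exact absurd rfl hne; exact ⟨h, rfl⟩⟩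
    · rcases List.mem_cons.mp hb with rfl | hb'
      · right; left; exact ⟨a, ha', rfl⟩
      · rcases ih ha' hb' with h | h
        · left; right; exact h
        · right; right; exact h

theorem ordp_cases (q : String × String) : ordp q = q ∨ ordp q = (q.2, q.1) := by
  unfold ordp; split_ifs
  · left; rfl
  · right; rfl

theorem ordp_lt {q : String × String} (h : q.1 ≠ q.2) : (ordp q).1 < (ordp q).2 := by
  unfold ordp; split_ifs with hlt
  · exact hlt
  · exact lt_of_le_of_ne (not_lt.mp hlt) (Ne.symm h)

theorem mem_map_ordp {l : List String} (hl : l.Nodup) (a b : String) :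
    (a, b) ∈ (pairsOf l).map ordp ↔ a < b ∧ a ∈ l ∧ b ∈ l := by
  constructor
  · rintro h
    rcases List.mem_map.mp h with ⟨⟨u, v⟩, hq, he⟩
    have hne := pairsOf_ne hl hq
    have hlt := ordp_lt hne
    rcases mem_pairsOf hq with ⟨h1, h2⟩
    simp only at h1 h2
    rcases ordp_cases (u, v) with hc | hc <;> rw [hc] at he hlt <;> cases he
    · exact ⟨hlt, h1, h2⟩
    · exact ⟨hlt, h2, h1⟩
  · rintro ⟨hab, ha, hb⟩
    rcases pairsOf_total ha hb (ne_of_lt hab) with h | h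
    · exact List.mem_map.mpr ⟨(a, b), h, by simp [ordp, hab]⟩
    · exact List.mem_map.mpr ⟨(b, a), h, by simp [ordp, not_lt.mpr (le_of_lt hab)]⟩

theorem ordp_comp_mem (q : String × String) (x : String) (h : x = (ordp q).1 ∨ x = (ordp q).2) :
    x = q.1 ∨ x = q.2 := by
  rcases ordp_cases q with hc | hc <;> rw [hc] at h <;> tauto

theorem nodup_map_ordp {l : List String} (hl : l.Nodup) : ((pairsOf l).map ordp).Nodup := by
  induction l with
  | nil => simp [pairsOf]
  | cons h t ih =>
    rcases List.nodup_cons.mp hl with ⟨hht, hnd⟩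
    simp only [pairsOf, List.map_append, List.map_map]
    apply List.Nodup.append
    · -- map over t of ordp (h, v)
      refine List.Nodup.map_on ?_ hnd
      intro u hu v hv he
      simp only [Function.comp] at he
      -- ordp (h,u) = ordp (h,v) → u = v
      have hu' : u ≠ h := fun e => hht (e ▸ hu)
      have hv' : v ≠ h := fun e => hht (e ▸ hv)
      unfold ordp at he
      simp only at he
      split_ifs at he <;> simp_all [Prod.ext_iff]
    · exact ih hnd
    · -- disjoint
      intro x hx1 hx2
      rcases List.mem_map.mp hx1 with ⟨v, hv, rfl⟩
      rcases List.mem_map.mp hx2 with ⟨q, hq, he⟩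
      rcases mem_pairsOf hq with ⟨h1, h2⟩
      have he' : ordp q = ordp (h, v) := he
      have hmem : h = (ordp q).1 ∨ h = (ordp q).2 := by
        rcases ordp_cases (h, v) with hc | hc <;> rw [he', hc] <;> simp
      rcases ordp_comp_mem q h hmem with hh | hh
      · exact hht (by rw [hh]; exact h1)
      · exact hht (by rw [hh]; exact h2)

theorem pairsOf_idx_lt {α : Type} [BEq α] [LawfulBEq α] {l : List α} (hl : l.Nodup)
    {q : α × α} (h : q ∈ pairsOf l) : l.idxOf q.1 < l.idxOf q.2 := by
  induction l with
  | nil => simp [pairsOf] at h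
  | cons x t ih =>
    rcases List.nodup_cons.mp hl with ⟨hxt, hnd⟩
    simp only [pairsOf, List.mem_append, List.mem_map] at h
    rcases h with ⟨v, hv, rfl⟩ | h
    · have hvx : v ≠ x := fun e => hxt (e ▸ hv)
      simp [List.idxOf_cons_self, List.idxOf_cons_ne _ (fun e => hvx e.symm)]
    · rcases mem_pairsOf h with ⟨h1, h2⟩
      have h1x : q.1 ≠ x := fun e => hxt (e ▸ h1)
      have h2x : q.2 ≠ x := fun e => hxt (e ▸ h2)
      rw [List.idxOf_cons_ne _ (fun e => h1x e.symm), List.idxOf_cons_ne _ (fun e => h2x e.symm)]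
      exact Nat.succ_lt_succ (ih hnd h)

theorem pairsOf_pairwise_lex {α : Type} (f : α → Int) (l : List α) (n : Int)
    (hl : l.Pairwise (fun a b => f a < f b)) (hb : ∀ x ∈ l, f x < n) (h0 : ∀ x ∈ l, 0 ≤ f x) :
    (pairsOf l).Pairwise (fun q q' => f q.1 * n + f q.2 < f q'.1 * n + f q'.2) := by
  induction l with
  | nil => simp [pairsOf]
  | cons h t ih =>
    rcases List.pairwise_cons.mp hl with ⟨hh, hnd⟩
    simp only [pairsOf]
    rw [List.pairwise_append]
    refine ⟨?_, ?_, ?_⟩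
    · rw [List.pairwise_map]
      exact hnd.imp_of_mem (fun {a b} ha hb' hab => by
        simp only
        nlinarith [hab])
    · exact ih hnd (fun x hx => hb x (List.mem_cons_of_mem _ hx))
        (fun x hx => h0 x (List.mem_cons_of_mem _ hx))
    · intro q hq q' hq'
      rcases List.mem_map.mp hq with ⟨v, hv, rfl⟩
      rcases mem_pairsOf hq' with ⟨h1, h2⟩
      have hfh1 : f h < f q'.1 := hh _ h1
      have hfv : f v < n := hb v (List.mem_cons_of_mem _ hv)
      have h02 : 0 ≤ f q'.2 := h0 _ (List.mem_cons_of_mem _ h2)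
      have hv0 : 0 ≤ f v := h0 v (List.mem_cons_of_mem _ hv)
      have hn : 0 ≤ n := le_of_lt (lt_of_le_of_lt hv0 hfv)
      have hstep : (f h + 1) * n ≤ f q'.1 * n :=
        mul_le_mul_of_nonneg_right (by linarith) hn
      simp only
      nlinarith [hstep]

theorem nodup_pairwise_idxOf {α : Type} [BEq α] [LawfulBEq α] (l : List α) (hl : l.Nodup) :
    l.Pairwise (fun a b => l.idxOf a < l.idxOf b) := by
  rw [List.pairwise_iff_getElem]
  intro i j hi hj hij
  rw [hl.idxOf_getElem i hi, hl.idxOf_getElem j hj]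
  exact hij

theorem doubleLoop_eq_pairsOf {γ : Type} (g : γ → String → String → γ) (xs : List String)
    (a : Nat) (init : γ) :
    (PySem.List.pyRange a (PySem.List.len xs) 1).foldl (fun acc i =>
      (PySem.List.pyRange (i + 1) (PySem.List.len xs) 1).foldl (fun acc j =>
        g acc (PySem.List.pyGetD xs i "") (PySem.List.pyGetD xs j "")) acc) init
    = (pairsOf (xs.drop a)).foldl (fun acc p => g acc p.1 p.2) init := by
  suffices H : ∀ (k a : Nat) (init : γ), xs.length - a ≤ k →
      (PySem.List.pyRange a (PySem.List.len xs) 1).foldl (fun acc i =>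
        (PySem.List.pyRange (i + 1) (PySem.List.len xs) 1).foldl (fun acc j =>
          g acc (PySem.List.pyGetD xs i "") (PySem.List.pyGetD xs j "")) acc) init
      = (pairsOf (xs.drop a)).foldl (fun acc p => g acc p.1 p.2) init by
    exact H xs.length a init (Nat.sub_le _ _)
  intro k
  induction k with
  | zero =>
    intro a init h
    have hle : xs.length ≤ a := by omega
    rw [PySem.List.pyRange_one_eq_nil (by simp; exact_mod_cast hle),
      List.drop_eq_nil_of_le hle]
    rfl
  | succ k ih =>
    intro a init h
    rcases Nat.lt_or_ge a xs.length with hlt | hle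
    case inr =>
      rw [PySem.List.pyRange_one_eq_nil (by simp; exact_mod_cast hle),
        List.drop_eq_nil_of_le hle]
      rfl
    case inl =>
      rw [PySem.List.pyRange_one_cons (by simp; exact_mod_cast hlt), List.foldl_cons]
      have hcast : ((a : Int) + 1) = ((a + 1 : Nat) : Int) := by push_cast; ring
      have hinner : ∀ (acc : γ),
          (PySem.List.pyRange ((a : Int) + 1) (PySem.List.len xs) 1).foldl (fun acc j =>
            g acc (PySem.List.pyGetD xs (a : Int) "") (PySem.List.pyGetD xs j "")) acc
          = (xs.drop (a + 1)).foldl (fun acc y => g acc (PySem.List.pyGetD xs (a : Int) "") y) acc := by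
        intro acc
        have := PySem.List.foldl_pyRange_pyGetD xs ""
          (fun acc y => g acc (PySem.List.pyGetD xs (a : Int) "") y) acc
          (a := ((a + 1 : Nat) : Int)) (by exact_mod_cast Int.natCast_nonneg _)
        simpa using this
      rw [hinner]
      have hdrop : xs.drop a = xs[a] :: xs.drop (a + 1) := (List.getElem_cons_drop hlt).symm
      rw [hdrop]
      have hget : PySem.List.pyGetD xs (a : Int) "" = xs[a] := by
        simp [PySem.List.pyGetD_natCast, List.getD_eq_getElem?_getD, List.getElem?_eq_getElem hlt]
      simp only [pairsOf, List.foldl_append, List.foldl_map, hget]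
      rw [hcast, ih (a + 1) _ (by omega)]
theorem sorted_pair (u v : String) :
    PySem.List.sorted [u, v] (fun x => x) false = if v < u then [v, u] else [u, v] := by
  simp [PySem.List.sorted, PySem.List.insertBy]

theorem pair_getD0 (x y : String) (d : String) : PySem.List.pyGetD [x, y] 0 d = x := rfl
theorem pair_getD1 (x y : String) (d : String) : PySem.List.pyGetD [x, y] 1 d = y := rfl

theorem A_char (sf : List (String × List String)) :
    find_shared_fields sf = (((pairsOf (pvKs sf)).map ordp).filter (pvP sf)).map (pvG sf) := by
  have hnd : (pvKs sf).Nodup := PySem.Dict.nodup_keys_ofList sf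
  have h0 : find_shared_fields sf
      = (pairsOf ((pvKs sf).drop 0)).foldl (fun acc p =>
          (fun (shared : List (String × String × List String)) u v =>
            let st := PySem.List.sorted [u, v] (fun x => x) false
            let s1 := PySem.List.pyGetD st 0 ""
            let s2 := PySem.List.pyGetD st 1 ""
            let common := PySem.Set.inter (PySem.Set.ofList ((pvD sf).getD s1 []))
              (PySem.Set.ofList ((pvD sf).getD s2 []))
            if common ≠ [] then shared ++ [(s1, s2, PySem.List.sorted common (fun x => x) false)]
            else shared) acc p.1 p.2) [] := by
    unfold find_shared_fields
    exact doubleLoop_eq_pairsOf (fun shared u v =>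
            let st := PySem.List.sorted [u, v] (fun x => x) false
            let s1 := PySem.List.pyGetD st 0 ""
            let s2 := PySem.List.pyGetD st 1 ""
            let common := PySem.Set.inter (PySem.Set.ofList ((pvD sf).getD s1 []))
              (PySem.Set.ofList ((pvD sf).getD s2 []))
            if common ≠ [] then shared ++ [(s1, s2, PySem.List.sorted common (fun x => x) false)]
            else shared) (pvKs sf) 0 []
  rw [List.drop_zero] at h0
  rw [h0]
  have h1 : (pairsOf (pvKs sf)).foldl (fun acc p =>
          (fun (shared : List (String × String × List String)) u v =>
            let st := PySem.List.sorted [u, v] (fun x => x) false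
            let s1 := PySem.List.pyGetD st 0 ""
            let s2 := PySem.List.pyGetD st 1 ""
            let common := PySem.Set.inter (PySem.Set.ofList ((pvD sf).getD s1 []))
              (PySem.Set.ofList ((pvD sf).getD s2 []))
            if common ≠ [] then shared ++ [(s1, s2, PySem.List.sorted common (fun x => x) false)]
            else shared) acc p.1 p.2) []
      = (pairsOf (pvKs sf)).foldl (fun acc q =>
          if pvInter sf (ordp q) ≠ [] then acc ++ [pvG sf (ordp q)] else acc) [] := by
    apply PySem.List.foldl_congr_mem
    intro acc q hq
    have hne := pairsOf_ne hnd hq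
    simp only [sorted_pair]
    rcases lt_or_ge q.2 q.1 with hlt | hle
    · have : ¬ q.1 < q.2 := not_lt.mpr (le_of_lt hlt)
      simp only [if_pos hlt, pair_getD0, pair_getD1]
      unfold pvInter pvG ordp
      simp [this, pvInter, pvS]
    · have hlt' : q.1 < q.2 := lt_of_le_of_ne hle hne
      have : ¬ q.2 < q.1 := not_lt.mpr hle
      simp only [if_neg this, pair_getD0, pair_getD1]
      unfold pvInter pvG ordp
      simp [hlt', pvInter, pvS]
  rw [h1, PySem.List.foldl_append_ite (p := fun q => pvInter sf (ordp q) ≠ []) (f := fun q => pvG sf (ordp q))]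
  rw [List.filter_map, List.map_map]
  simp only [List.nil_append]
  rfl

-- B-side characterisation ----------------------------------------------------
def pvFlat1 (sf : List (String × List String)) : List (String × String) :=
  (pvD sf).items.flatMap (fun p => (PySem.Set.ofList p.2).map (fun f => (f, p.1)))

theorem flatMap_ite_singleton_prop {α : Type} (l : List α) (p : α → Prop) [DecidablePred p] :
    l.flatMap (fun s => if p s then [s] else []) = l.filter (fun s => decide (p s)) := by
  induction l with
  | nil => rfl
  | cons h t ih => by_cases hp : p h <;> simp [hp, ih]

theorem ne_nil_iff_exists_mem {α : Type} (l : List α) : l ≠ [] ↔ ∃ x, x ∈ l := by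
  cases l <;> simp

theorem items_d (sf : List (String × List String)) :
    (pvD sf).items = (pvKs sf).map (fun s => (s, (pvD sf).getD s [])) :=
  PySem.Dict.items_eq_map_keys _ (PySem.Dict.nodup_keys_ofList sf) []

theorem idx_flat (sf : List (String × List String)) :
    pvIdx sf = (pvFlat1 sf).foldl (fun idx e => idx.modify e.1 [] (· ++ [e.2])) PySem.Dict.empty := by
  unfold pvIdx pvFlat1
  rw [List.foldl_flatMap]
  congr 1
  funext idx p
  rw [List.foldl_map]

theorem idx_getD (sf : List (String × List String)) (f : String) :
    (pvIdx sf).getD f [] = (pvKs sf).filter (fun s => decide (f ∈ pvS sf s)) := by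
  rw [idx_flat, PySem.Dict.getD_foldl_modify_append, PySem.Dict.getD_empty]
  unfold pvFlat1
  rw [items_d, List.flatMap_map, List.filter_flatMap, List.map_flatMap]
  have hstep : ∀ s : String,
      ((((PySem.Set.ofList ((pvD sf).getD s [])).map (fun f' => (f', s))).filter
        (fun e => e.1 == f)).map (fun x => x.2)) = if f ∈ pvS sf s then [s] else [] := by
    intro s
    rw [filter_map_pair _ (PySem.Set.nodup_ofList _) s f]
    by_cases h : f ∈ pvS sf s
    · rw [if_pos (by simpa [pvS] using h), if_pos h]; rfl
    · rw [if_neg (by simpa [pvS] using h), if_neg h]; rfl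
  calc ((pvKs sf).flatMap fun s =>
        ((((PySem.Set.ofList ((pvD sf).getD s [])).map (fun f' => (f', s))).filter
          (fun e => e.1 == f)).map (fun x => x.2)))
      = (pvKs sf).flatMap (fun s => if f ∈ pvS sf s then [s] else []) := by
        exact List.flatMap_congr (fun s _ => hstep s)
    _ = (pvKs sf).filter (fun s => decide (f ∈ pvS sf s)) :=
        flatMap_ite_singleton_prop _ _

theorem idx_keys (sf : List (String × List String)) :
    pvFK sf = PySem.Set.ofList ((pvFlat1 sf).map (fun e => e.1)) := by
  unfold pvFK
  rw [idx_flat, PySem.Dict.keys_foldl_modify_key _ (fun e : String × String => e.1) [] (fun _ e old => old ++ [e.2]),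
    PySem.Dict.keys_empty, PySem.Set.update_nil_left]

theorem FK_nodup (sf : List (String × List String)) : (pvFK sf).Nodup := by
  rw [idx_keys]; exact PySem.Set.nodup_ofList _

theorem mem_FK (sf : List (String × List String)) (f : String) :
    f ∈ pvFK sf ↔ ∃ s ∈ pvKs sf, f ∈ pvS sf s := by
  rw [idx_keys, PySem.Set.mem_ofList]
  unfold pvFlat1
  rw [items_d, List.flatMap_map, List.map_flatMap]
  simp [pvS]

def pvFlat2 (sf : List (String × List String)) : List ((String × String) × String) :=
  (pvIdx sf).items.flatMap (fun q => (pairsOf q.2).map (fun uv => (ordp uv, q.1)))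

theorem pf_flat (sf : List (String × List String)) :
    pvPf sf = (pvFlat2 sf).foldl (fun pf e => pf.modify e.1 [] (· ++ [e.2])) PySem.Dict.empty := by
  unfold pvPf pvFlat2
  rw [List.foldl_flatMap]
  congr 1
  funext pf q
  rw [List.foldl_map]
  simp only [ordp]

theorem items_idx (sf : List (String × List String)) :
    (pvIdx sf).items = (pvFK sf).map (fun f => (f, (pvIdx sf).getD f [])) :=
  PySem.Dict.items_eq_map_keys _ (FK_nodup sf) []

theorem ksf_nodup (sf : List (String × List String)) (f : String) :
    ((pvIdx sf).getD f []).Nodup := by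
  rw [idx_getD]
  exact (PySem.Dict.nodup_keys_ofList sf).filter _

theorem pf_getD (sf : List (String × List String)) (P : String × String) :
    (pvPf sf).getD P [] =
      (pvFK sf).filter (fun f => decide (P ∈ (pairsOf ((pvIdx sf).getD f [])).map ordp)) := by
  rw [pf_flat, PySem.Dict.getD_foldl_modify_append, PySem.Dict.getD_empty]
  unfold pvFlat2
  rw [items_idx, List.flatMap_map, List.filter_flatMap, List.map_flatMap]
  have hstep : ∀ f : String,
      ((((pairsOf ((pvIdx sf).getD f [])).map (fun uv => (ordp uv, f))).filter
        (fun e => e.1 == P)).map (fun x => x.2))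
      = if P ∈ (pairsOf ((pvIdx sf).getD f [])).map ordp then [f] else [] := by
    intro f
    have hmm : (pairsOf ((pvIdx sf).getD f [])).map (fun uv => (ordp uv, f))
        = ((pairsOf ((pvIdx sf).getD f [])).map ordp).map (fun y => (y, f)) := by
      rw [List.map_map]; rfl
    rw [hmm, filter_map_pair _ (nodup_map_ordp (ksf_nodup sf f)) f P]
    by_cases h : P ∈ (pairsOf ((pvIdx sf).getD f [])).map ordp
    · rw [if_pos h, if_pos h]; rfl
    · rw [if_neg h, if_neg h]; rfl
  calc ((pvFK sf).flatMap fun f =>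
        ((((pairsOf ((pvIdx sf).getD f [])).map (fun uv => (ordp uv, f))).filter
          (fun e => e.1 == P)).map (fun x => x.2)))
      = (pvFK sf).flatMap (fun f =>
          if P ∈ (pairsOf ((pvIdx sf).getD f [])).map ordp then [f] else []) :=
        List.flatMap_congr (fun f _ => hstep f)
    _ = (pvFK sf).filter (fun f => decide (P ∈ (pairsOf ((pvIdx sf).getD f [])).map ordp)) :=
        flatMap_ite_singleton_prop _ _

theorem pf_keys_nodup (sf : List (String × List String)) : (pvPf sf).keys.Nodup := by
  rw [pf_flat]
  exact PySem.Dict.nodup_keys_foldl_modify_key _ (fun e : (String × String) × String => e.1) []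
    (fun _ e old => old ++ [e.2]) _ (by simp [PySem.Dict.keys_empty])

theorem pf_keys_mem (sf : List (String × List String)) (P : String × String) :
    P ∈ (pvPf sf).keys ↔ P.1 < P.2 ∧ P.1 ∈ pvKs sf ∧ P.2 ∈ pvKs sf ∧ pvInter sf P ≠ [] := by
  have hnd : (pvKs sf).Nodup := PySem.Dict.nodup_keys_ofList sf
  rw [pf_flat, PySem.Dict.keys_foldl_modify_key _ (fun e : (String × String) × String => e.1) []
    (fun _ e old => old ++ [e.2]), PySem.Dict.keys_empty, PySem.Set.update_nil_left,
    PySem.Set.mem_ofList]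
  unfold pvFlat2
  rw [items_idx, List.flatMap_map, List.map_flatMap]
  simp only [List.mem_flatMap, List.map_map, List.mem_map]
  constructor
  · rintro ⟨f, hf, hP⟩
    have hP' : P ∈ (pairsOf ((pvIdx sf).getD f [])).map ordp := by
      simpa [Function.comp] using hP
    obtain ⟨a, b⟩ := P
    rw [mem_map_ordp (ksf_nodup sf f)] at hP'
    rcases hP' with ⟨hab, ha, hb⟩
    rw [idx_getD, List.mem_filter] at ha hb
    refine ⟨hab, ha.1, hb.1, ?_⟩
    rw [ne_nil_iff_exists_mem]
    refine ⟨f, ?_⟩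
    unfold pvInter pvS
    exact (PySem.Set.mem_inter _ _ _).mpr
      ⟨by simpa [pvS] using ha.2, by simpa [pvS] using hb.2⟩
  · obtain ⟨a, b⟩ := P
    rintro ⟨hab, ha, hb, hne⟩
    rw [ne_nil_iff_exists_mem] at hne
    obtain ⟨f, hf⟩ := hne
    unfold pvInter pvS at hf
    rw [PySem.Set.mem_inter] at hf
    refine ⟨f, (mem_FK sf f).mpr ⟨a, ha, hf.1⟩, ?_⟩
    have : (a, b) ∈ (pairsOf ((pvIdx sf).getD f [])).map ordp := by
      rw [mem_map_ordp (ksf_nodup sf f), idx_getD]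
      exact ⟨hab, List.mem_filter.mpr ⟨ha, by exact_mod_cast decide_eq_true hf.1⟩,
        List.mem_filter.mpr ⟨hb, by exact_mod_cast decide_eq_true hf.2⟩⟩
    simpa [Function.comp] using this

theorem pf_getD_on_key (sf : List (String × List String)) (P : String × String)
    (hab : P.1 < P.2) (h1 : P.1 ∈ pvKs sf) (h2 : P.2 ∈ pvKs sf) :
    PySem.List.sorted ((pvPf sf).getD P []) (fun x => x) false
      = PySem.List.sorted (pvInter sf P) (fun x => x) false := by
  rw [pf_getD]
  have hfc : (pvFK sf).filter (fun f => decide (P ∈ (pairsOf ((pvIdx sf).getD f [])).map ordp))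
      = (pvFK sf).filter (fun f => decide (f ∈ pvS sf P.1 ∧ f ∈ pvS sf P.2)) := by
    apply List.filter_congr
    intro f _
    obtain ⟨a, b⟩ := P
    simp only [decide_eq_decide]
    rw [mem_map_ordp (ksf_nodup sf f), idx_getD]
    simp only [List.mem_filter, decide_eq_true_eq]
    constructor
    · rintro ⟨_, ⟨_, hfa⟩, ⟨_, hfb⟩⟩; exact ⟨hfa, hfb⟩
    · rintro ⟨hfa, hfb⟩; exact ⟨hab, ⟨h1, hfa⟩, ⟨h2, hfb⟩⟩
  rw [hfc, PySem.List.sorted_id_eq_sorted_id_iff_perm]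
  have hint : (pvInter sf P).Nodup := by
    unfold pvInter pvS
    exact PySem.Set.nodup_inter _ _ (PySem.Set.nodup_ofList _)
  rw [List.perm_ext_iff_of_nodup ((FK_nodup sf).filter _) hint]
  intro f
  have hmi : f ∈ pvInter sf P ↔ f ∈ pvS sf P.1 ∧ f ∈ pvS sf P.2 := by
    unfold pvInter pvS
    rw [PySem.Set.mem_inter]
  rw [List.mem_filter, hmi, decide_eq_true_eq]
  constructor
  · rintro ⟨_, h⟩; exact h
  · rintro ⟨hfa, hfb⟩; exact ⟨(mem_FK sf f).mpr ⟨P.1, h1, hfa⟩, hfa, hfb⟩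

theorem B_char (sf : List (String × List String)) :
    find_shared_fields_alt sf =
      PySem.List.sorted ((pvPf sf).keys.map (pvG sf)) (pvKey sf) false := by
  have h0 : find_shared_fields_alt sf
      = PySem.List.sorted ((pvPf sf).items.map
          (fun e => (e.1.1, e.1.2, PySem.List.sorted e.2 (fun x => x) false))) (pvKey sf) false := by
    unfold find_shared_fields_alt pvKey pvPf pvIdx pvPos pvD
    rfl
  rw [h0, PySem.Dict.items_eq_map_keys (pvPf sf) (pf_keys_nodup sf) [], List.map_map]
  congr 1
  apply List.map_congr_left
  intro P hP
  rcases (pf_keys_mem sf P).mp hP with ⟨hab, h1, h2, _⟩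
  simp only [Function.comp]
  unfold pvG
  exact congrArg (fun z => (P.1, P.2, z)) (pf_getD_on_key sf P hab h1 h2)

-- position dict --------------------------------------------------------------
theorem pos_foldl_not_mem (t : List String) (s : String) (hs : s ∉ t) (st : Int)
    (m : PySem.Dict String Int) :
    ((PySem.List.enumerate t st).foldl (fun m is => m.insert is.2 is.1) m).getD s 0
      = m.getD s 0 := by
  induction t generalizing st m with
  | nil => rfl
  | cons h t ih =>
    rw [PySem.List.enumerate_cons, List.foldl_cons]
    rw [ih (fun hm => hs (List.mem_cons_of_mem _ hm)) (st + 1)]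
    rw [PySem.Dict.getD_insert, if_neg (fun e => hs (by rw [e]; exact List.mem_cons_self))]

theorem pos_foldl_mem (t : List String) (hl : t.Nodup) (s : String) (hs : s ∈ t) (st : Int)
    (m : PySem.Dict String Int) :
    ((PySem.List.enumerate t st).foldl (fun m is => m.insert is.2 is.1) m).getD s 0
      = st + t.idxOf s := by
  induction t generalizing st m with
  | nil => simp at hs
  | cons h t ih =>
    rcases List.nodup_cons.mp hl with ⟨hht, hnd⟩
    rw [PySem.List.enumerate_cons, List.foldl_cons]
    by_cases he : s = h
    · subst he
      rw [pos_foldl_not_mem t s hht (st + 1), PySem.Dict.getD_insert_self,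
        List.idxOf_cons_self]
      simp
    · have hs' : s ∈ t := by
        rcases List.mem_cons.mp hs with h' | h'
        · exact absurd h' he
        · exact h'
      rw [ih hnd hs' (st + 1), List.idxOf_cons_ne _ (fun e => he e.symm)]
      push_cast
      ring

theorem pos_getD (sf : List (String × List String)) (s : String) (hs : s ∈ pvKs sf) :
    (pvPos sf).getD s 0 = ((pvKs sf).idxOf s : Int) := by
  unfold pvPos
  rw [pos_foldl_mem (pvD sf).keys (PySem.Dict.nodup_keys_ofList sf) s hs 0]
  simp [pvKs]

theorem size_eq (sf : List (String × List String)) :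
    (PySem.Dict.size (pvD sf) : Int) = ((pvKs sf).length : Int) := by
  unfold pvKs
  simp [PySem.Dict.size, PySem.Dict.keys]

theorem key_of_pair (sf : List (String × List String)) {q : String × String}
    (hq : q ∈ pairsOf (pvKs sf)) :
    pvKey sf (pvG sf (ordp q)) =
      ((pvKs sf).idxOf q.1 : Int) * ((pvKs sf).length : Int) + ((pvKs sf).idxOf q.2 : Int) := by
  have hnd : (pvKs sf).Nodup := PySem.Dict.nodup_keys_ofList sf
  rcases mem_pairsOf hq with ⟨h1, h2⟩
  have hidx := pairsOf_idx_lt hnd hq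
  have hle : ((pvKs sf).idxOf q.1 : Int) ≤ ((pvKs sf).idxOf q.2 : Int) := by
    exact_mod_cast le_of_lt hidx
  rcases ordp_cases q with hc | hc <;>
    rw [hc] <;> unfold pvKey pvG <;> simp only <;>
    rw [pos_getD sf _ h1, pos_getD sf _ h2, size_eq]
  · rw [min_eq_left hle, max_eq_right hle]
  · rw [min_comm, max_comm, min_eq_left hle, max_eq_right hle]

theorem A_pairwise (sf : List (String × List String)) :
    ((((pairsOf (pvKs sf)).map ordp).filter (pvP sf)).map (pvG sf)).Pairwise
      (fun t t' => pvKey sf t < pvKey sf t') := by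
  have hnd : (pvKs sf).Nodup := PySem.Dict.nodup_keys_ofList sf
  rw [List.pairwise_map]
  apply List.Pairwise.sublist List.filter_sublist
  rw [List.pairwise_map]
  have hpw : (pvKs sf).Pairwise
      (fun a b => ((pvKs sf).idxOf a : Int) < ((pvKs sf).idxOf b : Int)) :=
    (nodup_pairwise_idxOf (pvKs sf) hnd).imp (fun h => by exact_mod_cast h)
  have base := pairsOf_pairwise_lex (fun s => ((pvKs sf).idxOf s : Int)) (pvKs sf)
    ((pvKs sf).length : Int) hpw
    (fun x hx => by
      show ((pvKs sf).idxOf x : Int) < ((pvKs sf).length : Int)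
      exact_mod_cast List.idxOf_lt_length_of_mem hx)
    (fun x _ => Int.natCast_nonneg _)
  refine base.imp_of_mem (fun {q q'} hq hq' hlt => ?_)
  rw [key_of_pair sf hq, key_of_pair sf hq']
  exact hlt

theorem perm_AB (sf : List (String × List String)) :
    ((((pairsOf (pvKs sf)).map ordp).filter (pvP sf)).map (pvG sf)).Perm
      ((pvPf sf).keys.map (pvG sf)) := by
  have hnd : (pvKs sf).Nodup := PySem.Dict.nodup_keys_ofList sf
  apply List.Perm.map
  rw [List.perm_ext_iff_of_nodup ((nodup_map_ordp hnd).filter _) (pf_keys_nodup sf)]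
  rintro ⟨a, b⟩
  rw [List.mem_filter, pf_keys_mem, mem_map_ordp hnd]
  unfold pvP
  rw [decide_eq_true_eq]
  constructor
  · rintro ⟨⟨hab, ha, hb⟩, hne⟩; exact ⟨hab, ha, hb, hne⟩
  · rintro ⟨hab, ha, hb, hne⟩; exact ⟨⟨hab, ha, hb⟩, hne⟩

-- ===== VERDICT (by name: the statement is the Claim_ definition above) =====
theorem find_shared_fields_spec : Claim_equal_find_shared_fields := by
  intro sf _
  unfold Spec_find_shared_fields
  rw [B_char, A_char, PySem.List.sorted_eq_of_perm_of_pairwise_lt _ _ _ (perm_AB sf) (A_pairwise sf)]
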